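-- pv_equiv track=rewrite | github.com/ayazkhan27/cyclic | whatthesigma.py | analyze_cyclic_prime
-- ===== SOURCE A (Python) =====
-- def minimal_movement(start_sequence, target_sequence, digit_positions, sequence_length, cyclic_sequence):
--     start_positions = digit_positions[start_sequence]
--     target_positions = digit_positions[target_sequence]
--
--     min_movement = sequence_length  # Initialize with a value larger than any possible movement
--
--     for start_pos in start_positions:
--         for target_pos in target_positions:
--             # Calculate clockwise and anticlockwise movements
--             clockwise_movement = (target_pos - start_pos) % sequence_length
--             anticlockwise_movement = (start_pos - target_pos) % sequence_length
--
--             # Find the minimal movement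
--             if clockwise_movement <= anticlockwise_movement:
--                 movement = clockwise_movement
--             else:
--                 movement = -anticlockwise_movement
--
--             if abs(movement) < abs(min_movement):
--                 min_movement = movement
--
--     return min_movement
--
-- def generate_target_sequences(prime, cyclic_sequence):
--     sequence_length = len(cyclic_sequence)
--     group_length = len(str(prime))
--
--     if prime < 10:
--         return sorted(set(cyclic_sequence))
--     else:
--         cyclic_groups = []
--         for i in range(sequence_length):
--             group = cyclic_sequence[i:i+group_length]
--             if len(group) == group_length:
--                 cyclic_groups.append(group)
--             else:  # Wrap-around case
--                 wrap_around_group = cyclic_sequence[i:] + cyclic_sequence[:group_length-len(group)]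
--                 cyclic_groups.append(wrap_around_group)
--
--         cyclic_groups = sorted(set(cyclic_groups))
--         return cyclic_groups[:prime - 1]
--
-- def analyze_cyclic_prime(prime, cyclic_sequence):
--     sequence_length = len(cyclic_sequence)
--     digit_positions = {}
--
--     if prime < 10:
--         digit_positions = {digit: [idx for idx, d in enumerate(cyclic_sequence) if d == digit] for digit in set(cyclic_sequence)}
--     else:
--         group_length = len(str(prime))
--         for i in range(sequence_length):
--             group = cyclic_sequence[i:i+group_length]
--             if len(group) == group_length:
--                 if group in digit_positions:
--                     digit_positions[group].append(i)
--                 else: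
--                     digit_positions[group] = [i]
--             else:  # Wrap-around case
--                 wrap_around_group = cyclic_sequence[i:] + cyclic_sequence[:group_length-len(group)]
--                 if wrap_around_group in digit_positions:
--                     digit_positions[wrap_around_group].append(i)
--                 else:
--                     digit_positions[wrap_around_group] = [i]
--
--     target_sequences = generate_target_sequences(prime, cyclic_sequence)
--
--     movements = []
--     start_sequence = cyclic_sequence[:len(target_sequences[0])]
--     for target_sequence in target_sequences:
--         movement = minimal_movement(start_sequence, target_sequence, digit_positions, sequence_length, cyclic_sequence)
--         movements.append(movement)
--
--     return movements
-- ===== SOURCE B (Python) =====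
-- def analyze_cyclic_prime(prime, cyclic_sequence):
--     # Index-free re-implementation: no position dictionary at all.  Groups are read
--     # from the doubled string (which makes the wrap-around branch disappear), the
--     # targets are the sorted distinct groups, and each movement is found by scanning
--     # index pairs directly with membership tests instead of precomputed position lists.
--     n = len(cyclic_sequence)
--     gl = 1 if prime < 10 else len(str(prime))
--     doubled = cyclic_sequence + cyclic_sequence
--
--     def grp(i):
--         return doubled[i:i + gl]
--
--     targets = sorted({grp(i) for i in range(n)})
--     if prime >= 10:
--         targets = targets[:prime - 1]
--     start = grp(0)
--
--     out = []
--     for t in targets: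
--         best = n
--         for i in range(n):
--             if grp(i) != start:
--                 continue
--             for j in range(n):
--                 if grp(j) != t:
--                     continue
--                 d = (j - i) % n
--                 mv = d if 2 * d <= n else d - n
--                 if abs(mv) < abs(best):
--                     best = mv
--         out.append(best)
--     return out
-- ===== Notes on version B (the rewrite author's own statement) =====
-- stated objective: alternative
-- what changed: B eliminates A's position dictionary and its two regrouping scans entirely: groups are read as plain slices of the doubled string (no wrap-around branch), targets are the sorted distinct groups, and each movement is found by scanning index pairs directly with group-membership tests instead of looking up precomputed position lists.
import Mathlib
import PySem

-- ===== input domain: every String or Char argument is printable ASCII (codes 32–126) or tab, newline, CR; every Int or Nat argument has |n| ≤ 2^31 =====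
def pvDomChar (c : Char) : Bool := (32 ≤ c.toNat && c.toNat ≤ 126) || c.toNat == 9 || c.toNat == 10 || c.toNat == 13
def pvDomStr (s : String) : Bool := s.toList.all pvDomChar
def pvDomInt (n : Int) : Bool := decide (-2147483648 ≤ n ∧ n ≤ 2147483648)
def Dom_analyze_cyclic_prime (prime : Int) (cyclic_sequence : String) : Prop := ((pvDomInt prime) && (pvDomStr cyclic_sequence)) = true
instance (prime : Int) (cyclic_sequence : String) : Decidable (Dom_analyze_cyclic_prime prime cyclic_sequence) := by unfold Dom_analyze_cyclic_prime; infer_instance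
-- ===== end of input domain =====

-- B drops A's position dictionary entirely: groups are read off the doubled string (no
-- wrap-around branch), targets are the sorted distinct groups, and each movement scans
-- index pairs directly with membership tests (objective: alternative, dictionary-free; not faster).

-- ===== PORT A =====
-- A's minimal_movement (the unused cyclic_sequence parameter of the Python helper is kept).
def pvMinimalMovement (start_sequence target_sequence : List Char)
    (digit_positions : PySem.Dict (List Char) (List Int)) (sequence_length : Int)
    (_cyclic_sequence : List Char) : Int :=
  let start_positions := digit_positions.getD start_sequence []
  let target_positions := digit_positions.getD target_sequence []
  start_positions.foldl (fun min_movement start_pos =>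
    target_positions.foldl (fun min_movement target_pos =>
      let clockwise_movement := PySem.Int.mod (target_pos - start_pos) sequence_length
      let anticlockwise_movement := PySem.Int.mod (start_pos - target_pos) sequence_length
      let movement := if clockwise_movement ≤ anticlockwise_movement then clockwise_movement
                      else -anticlockwise_movement
      if |movement| < |min_movement| then movement else min_movement) min_movement) sequence_length

-- A's generate_target_sequences.  Python's set(...) iterates in unspecified order; it is ported as
-- PySem.Set (first-occurrence order), which the subsequent sorted(...) makes irrelevant for the
-- result.  Single characters (Python length-1 strings) are singleton `List Char` keys.
def pvGenerateTargetSequences (prime : Int) (cyclic_sequence : List Char) : List (List Char) :=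
  let sequence_length : Int := cyclic_sequence.length
  let group_length : Int := (PySem.Int.toStr prime).toList.length
  if prime < 10 then
    PySem.List.sorted (PySem.Set.ofList (cyclic_sequence.map (fun c => [c]))) (fun k => k) false
  else
    let cyclic_groups := (PySem.List.pyRange 0 sequence_length 1).foldl (fun acc i =>
      let group := PySem.List.slice cyclic_sequence (some i) (some (i + group_length))
      if (group.length : Int) = group_length then acc ++ [group]
      else acc ++ [PySem.List.slice cyclic_sequence (some i) none ++
                   PySem.List.slice cyclic_sequence none (some (group_length - group.length))]) []
    let cyclic_groups' := PySem.List.sorted (PySem.Set.ofList cyclic_groups) (fun k => k) false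
    PySem.List.slice cyclic_groups' none (some (prime - 1))

def analyze_cyclic_prime (prime : Int) (cyclic_sequence : String) : List Int :=
  let xs := cyclic_sequence.toList
  let sequence_length : Int := xs.length
  let digit_positions : PySem.Dict (List Char) (List Int) :=
    if prime < 10 then
      (PySem.Set.ofList (xs.map (fun c => [c]))).foldl (fun d digit =>
        d.insert digit (((PySem.List.enumerate xs 0).filter (fun p => [p.2] == digit)).map (·.1)))
        PySem.Dict.empty
    else
      let group_length : Int := (PySem.Int.toStr prime).toList.length
      (PySem.List.pyRange 0 sequence_length 1).foldl (fun d i =>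
        let group := PySem.List.slice xs (some i) (some (i + group_length))
        if (group.length : Int) = group_length then
          if d.contains group then d.insert group (d.getD group [] ++ [i]) else d.insert group [i]
        else
          let wrap := PySem.List.slice xs (some i) none ++
                      PySem.List.slice xs none (some (group_length - group.length))
          if d.contains wrap then d.insert wrap (d.getD wrap [] ++ [i]) else d.insert wrap [i])
        PySem.Dict.empty
  let target_sequences := pvGenerateTargetSequences prime xs
  let start_sequence :=
    PySem.List.slice xs none (some ((PySem.List.pyGetD target_sequences 0 []).length : Int))
  target_sequences.foldl (fun movements t =>
    movements ++ [pvMinimalMovement start_sequence t digit_positions sequence_length xs]) []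

-- ===== PORT B =====
-- B's grp helper: a group is a straight slice of the doubled sequence.
def pvGrp (doubled : List Char) (gl : Int) (i : Int) : List Char :=
  PySem.List.slice doubled (some i) (some (i + gl))

def analyze_cyclic_prime_alt (prime : Int) (cyclic_sequence : String) : List Int :=
  let xs := cyclic_sequence.toList
  let n : Int := xs.length
  let gl : Int := if prime < 10 then 1 else (PySem.Int.toStr prime).toList.length
  let doubled := xs ++ xs
  let targets0 := PySem.List.sorted
    (PySem.Set.ofList ((PySem.List.pyRange 0 n 1).map (pvGrp doubled gl))) (fun k => k) false
  let targets := if 10 ≤ prime then PySem.List.slice targets0 none (some (prime - 1)) else targets0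
  let start := pvGrp doubled gl 0
  targets.foldl (fun out t =>
    out ++ [(PySem.List.pyRange 0 n 1).foldl (fun best i =>
      if pvGrp doubled gl i ≠ start then best
      else (PySem.List.pyRange 0 n 1).foldl (fun best j =>
        if pvGrp doubled gl j ≠ t then best
        else
          let d := PySem.Int.mod (j - i) n
          let mv := if 2 * d ≤ n then d else d - n
          if |mv| < |best| then mv else best) best) n]) []

-- ===== PRECONDITION & SPEC =====
-- Pre_ excludes exactly the inputs on which A raises: the empty string (IndexError on
-- target_sequences[0]) and, for prime ≥ 10, strings shorter than len(str(prime)) (KeyError: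
-- every index key is then longer than the whole string, so start_sequence is never a key).
def Pre_analyze_cyclic_prime (prime : Int) (cyclic_sequence : String) : Prop :=
  cyclic_sequence.toList ≠ [] ∧
  (10 ≤ prime → (PySem.Int.toStr prime).toList.length ≤ cyclic_sequence.toList.length)
instance (prime : Int) (cyclic_sequence : String) : Decidable (Pre_analyze_cyclic_prime prime cyclic_sequence) := by unfold Pre_analyze_cyclic_prime; infer_instance
def pvWitness_analyze_cyclic_prime : Int × String := (7, "142857")

def Spec_analyze_cyclic_prime (prime : Int) (cyclic_sequence : String) (out : List Int) : Prop := out = analyze_cyclic_prime_alt prime cyclic_sequence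
instance (prime : Int) (cyclic_sequence : String) (out : List Int) : Decidable (Spec_analyze_cyclic_prime prime cyclic_sequence out) := by unfold Spec_analyze_cyclic_prime; infer_instance

-- ===== CLAIM (what is proved, stated in full; the proofs are below) =====
def Claim_equal_analyze_cyclic_prime : Prop := ∀ (prime : Int) (cyclic_sequence : String), Dom_analyze_cyclic_prime prime cyclic_sequence → Pre_analyze_cyclic_prime prime cyclic_sequence → Spec_analyze_cyclic_prime prime cyclic_sequence (analyze_cyclic_prime prime cyclic_sequence)
-- ===== LEMMAS AND PROOFS =====

-- A's clockwise/anticclockwise choice equals B's folded-remainder formula.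
theorem pv_movement_eq (n s p : Int) (hn : 0 < n) :
    (if PySem.Int.mod (p - s) n ≤ PySem.Int.mod (s - p) n then PySem.Int.mod (p - s) n
     else -(PySem.Int.mod (s - p) n))
      = (if 2 * PySem.Int.mod (p - s) n ≤ n then PySem.Int.mod (p - s) n
         else PySem.Int.mod (p - s) n - n) := by
  simp only [PySem.Int.mod_eq_emod_of_pos hn]
  have h1 := Int.emod_nonneg (p - s) (by omega : n ≠ 0)
  have h2 := Int.emod_nonneg (s - p) (by omega : n ≠ 0)
  have h3 := Int.emod_lt_of_pos (p - s) hn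
  have h4 := Int.emod_lt_of_pos (s - p) hn
  have h0 : ((p - s) % n + (s - p) % n) % n = 0 := by
    rw [← Int.add_emod]
    simp [show p - s + (s - p) = 0 by ring]
  obtain ⟨c, hc⟩ := Int.dvd_of_emod_eq_zero h0
  have hcc : c = 0 ∨ c = 1 := by
    rcases lt_trichotomy c 0 with h | h | h
    · nlinarith
    · left; exact h
    · rcases lt_or_ge c 2 with h' | h'
      · right; omega
      · nlinarith
  split_ifs <;> rcases hcc with rfl | rfl <;> omega

theorem pv_getD_not_contains {κ ν : Type} [BEq κ] (d : PySem.Dict κ ν) (k : κ) (dflt : ν)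
    (h : d.contains k = false) : d.getD k dflt = dflt := by
  simp only [PySem.Dict.contains, List.any_eq_false] at h
  simp only [PySem.Dict.getD, PySem.Dict.get?]
  rw [List.find?_eq_none.mpr h]
  rfl

theorem pv_insert_step {κ ν : Type} [BEq κ] (d : PySem.Dict κ (List ν)) (k : κ) (i : ν) :
    (if d.contains k then d.insert k (d.getD k [] ++ [i]) else d.insert k [i])
      = d.insert k (d.getD k [] ++ [i]) := by
  by_cases h : d.contains k
  · rw [if_pos h]
  · rw [if_neg h, pv_getD_not_contains _ _ _ (by simpa using h)]
    rfl

-- A's wrap-aware group reader (proof-side name for the groups both of A's scans produce).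
def pvGroupAt (xs : List Char) (gl : Int) (i : Int) : List Char :=
  let g := PySem.List.slice xs (some i) (some (i + gl))
  if (g.length : Int) ≠ gl then
    PySem.List.slice xs (some i) none ++ PySem.List.slice xs none (some (gl - g.length))
  else g

-- A's insert-or-append dictionary step is exactly d.modify (group at i) [] (· ++ [i]).
theorem pv_stepA_eq_modify (xs : List Char) (gl : Int) (d : PySem.Dict (List Char) (List Int))
    (i : Int) :
    (let group := PySem.List.slice xs (some i) (some (i + gl))
     if (group.length : Int) = gl then
       if d.contains group then d.insert group (d.getD group [] ++ [i]) else d.insert group [i]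
     else
       let wrap := PySem.List.slice xs (some i) none ++
                   PySem.List.slice xs none (some (gl - group.length))
       if d.contains wrap then d.insert wrap (d.getD wrap [] ++ [i]) else d.insert wrap [i])
      = d.modify (pvGroupAt xs gl i) [] (· ++ [i]) := by
  simp only [pvGroupAt, PySem.Dict.modify, pv_insert_step]
  by_cases h1 : ((PySem.List.slice xs (some i) (some (i + gl))).length : Int) = gl
  · rw [if_pos h1, if_neg (by simpa using h1)]
  · rw [if_neg h1, if_pos (by simpa using h1)]

theorem pv_zip_map_fold {α β γ : Type} (l : List α) (g : α → β)
    (F : γ → β × α → γ) : ∀ (d : γ),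
    ((l.map g).zip l).foldl F d = l.foldl (fun d i => F d (g i, i)) d := by
  induction l with
  | nil => intro d; rfl
  | cons x t ih => intro d; simp [ih]

theorem pv_foldl_congr {α β : Type} (l : List α) (f g : β → α → β) (a : β)
    (h : ∀ b x, f b x = g b x) : l.foldl f a = l.foldl g a := by
  have : f = g := by funext b x; exact h b x
  rw [this]

-- The position index A builds, named for the proofs below.
def pvIndex (xs : List Char) (gl : Int) : PySem.Dict (List Char) (List Int) :=
  (((PySem.List.pyRange 0 (xs.length : Int) 1).map (pvGroupAt xs gl)).zip
    (PySem.List.pyRange 0 (xs.length : Int) 1)).foldl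
    (fun d p => d.modify p.1 [] (· ++ [p.2])) PySem.Dict.empty

theorem pv_positions_keys (groups : List (List Char)) (r : List Int)
    (h : groups.length ≤ r.length) :
    ((groups.zip r).foldl (fun d p => d.modify p.1 [] (· ++ [p.2]))
        (PySem.Dict.empty : PySem.Dict (List Char) (List Int))).keys
      = PySem.Set.ofList groups := by
  have h2 := PySem.Dict.keys_foldl_modify_key (l := groups.zip r) (key := Prod.fst) (d0 := [])
    (f := fun _ p => (· ++ [p.2])) (d := PySem.Dict.empty)
  rw [List.map_fst_zip h] at h2
  exact h2

theorem pvIndex_keys (xs : List Char) (gl : Int) :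
    (pvIndex xs gl).keys
      = PySem.Set.ofList ((PySem.List.pyRange 0 (xs.length : Int) 1).map (pvGroupAt xs gl)) :=
  pv_positions_keys _ _ (by simp [PySem.List.length_pyRange_one])

theorem pvIndex_nodup (xs : List Char) (gl : Int) : (pvIndex xs gl).keys.Nodup :=
  PySem.Dict.nodup_keys_foldl_modify_key (l := _) (key := Prod.fst) (d0 := [])
    (f := fun _ p => (· ++ [p.2])) (d := PySem.Dict.empty) List.nodup_nil

-- Character case: A's comprehension value list = the filtered zip value list.
theorem pv_char_values (xs : List Char) (k : List Char) : ∀ (s : Int),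
    ((PySem.List.enumerate xs s).filter (fun p => [p.2] == k)).map (·.1)
      = (((xs.map (fun c => [c])).zip (PySem.List.pyRange s (s + xs.length) 1)).filter
          (fun p => p.1 == k)).map (·.2) := by
  induction xs with
  | nil => intro s; simp [PySem.List.enumerate_nil]
  | cons x t ih =>
    intro s
    rw [PySem.List.enumerate_cons]
    rw [show s + (((x :: t).length : Nat) : Int) = (s + 1) + (t.length : Int) by
      push_cast [List.length_cons]; ring]
    rw [PySem.List.pyRange_one_cons (by omega)]
    simp only [List.map_cons, List.zip_cons_cons, List.filter_cons]
    by_cases hk : ([x] == k) = true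
    · simp only [hk, if_pos, List.map_cons]
      rw [ih]
    · simp only [hk, Bool.false_eq_true, if_false]
      rw [ih]

theorem pv_group_one (xs : List Char) (kk : Nat) (hk : kk < xs.length) :
    pvGroupAt xs 1 (kk : Int) = [xs[kk]] := by
  have h1 : PySem.List.slice xs (some (kk : Int)) (some ((kk : Int) + 1)) = (xs.drop kk).take 1 := by
    have := PySem.List.slice_natCast_add xs kk 1
    simpa using this
  rw [List.drop_eq_getElem_cons hk] at h1
  have h2 : PySem.List.slice xs (some (kk : Int)) (some ((kk : Int) + 1)) = [xs[kk]] := by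
    rw [h1]; rfl
  simp [pvGroupAt, h2]

-- The group list at group_length 1 is the singleton-character list.
theorem pv_groups_one (xs : List Char) :
    (PySem.List.pyRange 0 (xs.length : Int) 1).map (pvGroupAt xs 1)
      = xs.map (fun c => [c]) := by
  rw [PySem.List.pyRange_one]
  simp only [Int.sub_zero, Int.toNat_natCast, List.map_map]
  apply List.ext_getElem (by simp)
  intro kk h1 h2
  simp only [List.getElem_map, List.getElem_range, Function.comp_apply, zero_add]
  rw [pv_group_one xs kk (by simpa using h2)]

-- Every group has length group_length when group_length ≤ len(cyclic_sequence).
theorem pv_group_length (xs : List Char) (gl : Int) (hgl : 0 ≤ gl) (hle : gl ≤ (xs.length : Int))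
    (i : Int) (h0 : 0 ≤ i) (hi : i < (xs.length : Int)) :
    ((pvGroupAt xs gl i).length : Int) = gl := by
  have hsl := PySem.List.length_slice xs i (i + gl)
  simp only [PySem.List.clampIdx, if_neg (by omega : ¬ i + gl < 0), if_neg (by omega : ¬ i < 0)] at hsl
  unfold pvGroupAt
  by_cases hlen : (((PySem.List.slice xs (some i) (some (i + gl))).length : Nat) : Int) = gl
  · rw [if_neg (by simpa using hlen)]
    exact hlen
  · rw [if_pos (by simpa using hlen)]
    rw [PySem.List.slice_from xs h0, PySem.List.slice_to xs (by omega)]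
    simp only [List.length_append, List.length_drop, List.length_take]
    push_cast
    omega

-- B's doubled-sequence slice equals A's wrap-aware group for in-range i.
theorem pv_grp_eq (xs : List Char) (gl i : Int) (hgl : 0 ≤ gl) (hle : gl ≤ (xs.length : Int))
    (h0 : 0 ≤ i) (hi : i < (xs.length : Int)) :
    pvGrp (xs ++ xs) gl i = pvGroupAt xs gl i := by
  obtain ⟨k, rfl⟩ : ∃ k : Nat, i = (k : Int) := ⟨i.toNat, (Int.toNat_of_nonneg h0).symm⟩
  obtain ⟨g, rfl⟩ : ∃ g : Nat, gl = (g : Int) := ⟨gl.toNat, (Int.toNat_of_nonneg hgl).symm⟩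
  have hk : k < xs.length := by exact_mod_cast hi
  have hgL : g ≤ xs.length := by exact_mod_cast hle
  have hL : pvGrp (xs ++ xs) (g : Int) (k : Int) = ((xs ++ xs).drop k).take g := by
    unfold pvGrp
    exact PySem.List.slice_natCast_add (xs ++ xs) k g
  have hS : PySem.List.slice xs (some (k : Int)) (some ((k : Int) + (g : Int)))
      = (xs.drop k).take g := by
    have := PySem.List.slice_natCast_add xs k g
    simpa using this
  have hdrop : (xs ++ xs).drop k = xs.drop k ++ xs :=
    List.drop_append_of_le_length (le_of_lt hk)
  by_cases hcase : k + g ≤ xs.length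
  · have hlen : ((xs.drop k).take g).length = g := by
      simp [List.length_take, List.length_drop]; omega
    unfold pvGroupAt
    rw [hS, if_neg (by push_cast [hlen]; omega)]
    rw [hL, hdrop, List.take_append_of_le_length (by simp [List.length_drop]; omega)]
  · have hlen : ((xs.drop k).take g).length = xs.length - k := by
      simp [List.length_take, List.length_drop]; omega
    unfold pvGroupAt
    rw [hS, if_pos (by push_cast [hlen]; omega)]
    rw [hL, hdrop, List.take_append, List.take_of_length_le (by simp [List.length_drop]; omega)]
    congr 1
    · exact (PySem.List.slice_from_natCast xs k).symm
    · simp only [List.length_drop]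
      rw [show (g : Int) - ((xs.length - k : Nat) : Int) = (((g - (xs.length - k) : Nat)) : Int) by
        omega]
      exact (PySem.List.slice_to_natCast xs (g - (xs.length - k))).symm

-- B's start group is the plain prefix slice A uses.
theorem pv_start_eq (xs : List Char) (gl : Int) (hgl : 0 ≤ gl) (hle : gl ≤ (xs.length : Int)) :
    pvGrp (xs ++ xs) gl 0 = PySem.List.slice xs none (some gl) := by
  unfold pvGrp
  rw [zero_add, PySem.List.slice_zero_start, PySem.List.slice_to _ hgl,
    PySem.List.slice_to _ hgl]
  exact List.take_append_of_le_length (by omega)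

-- getD of A's index = the range positions whose group is the key.
theorem pvIndex_getD (xs : List Char) (gl : Int) (k : List Char) :
    (pvIndex xs gl).getD k []
      = (PySem.List.pyRange 0 (xs.length : Int) 1).filter (fun i => pvGroupAt xs gl i == k) := by
  have hz : ((PySem.List.pyRange 0 (xs.length : Int) 1).map (pvGroupAt xs gl)).zip
      (PySem.List.pyRange 0 (xs.length : Int) 1)
      = (PySem.List.pyRange 0 (xs.length : Int) 1).map (fun i => (pvGroupAt xs gl i, i)) := by
    have h := List.zip_map' (f := pvGroupAt xs gl) (g := id)
      (l := PySem.List.pyRange 0 (xs.length : Int) 1)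
    simpa using h
  unfold pvIndex
  rw [hz]
  have h := PySem.Dict.getD_foldl_modify_append
    (l := (PySem.List.pyRange 0 (xs.length : Int) 1).map (fun i => (pvGroupAt xs gl i, i)))
    (d := (PySem.Dict.empty : PySem.Dict (List Char) (List Int))) (c := k)
  simpa [List.filter_map, List.map_map, Function.comp_def] using h

-- A's dictionary in the prime < 10 branch equals the index.
theorem pv_char_dict_eq (xs : List Char) :
    (PySem.Set.ofList (xs.map (fun c => [c]))).foldl (fun d digit =>
        d.insert digit (((PySem.List.enumerate xs 0).filter (fun p => [p.2] == digit)).map (·.1)))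
        PySem.Dict.empty
      = pvIndex xs 1 := by
  apply PySem.Dict.ext
  have hA := PySem.Dict.items_foldl_insert_fresh (l := PySem.Set.ofList (xs.map (fun c => [c])))
    (k := fun k => k)
    (v := fun digit => ((PySem.List.enumerate xs 0).filter (fun p => [p.2] == digit)).map (·.1))
    (d := PySem.Dict.empty) (by intro a _; rfl)
    (by simp)
  rw [hA]
  have hB := PySem.Dict.items_eq_map_keys _ (pvIndex_nodup xs 1) []
  rw [hB, pvIndex_keys, pv_groups_one,
    show (PySem.Dict.empty : PySem.Dict (List Char) (List Int)).items = [] from rfl,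
    List.nil_append]
  apply List.map_congr_left
  intro k _
  dsimp only
  rw [pvIndex_getD]
  have h1 := pv_char_values xs k 0
  rw [zero_add] at h1
  rw [h1]
  have hz : (xs.map (fun c => [c])).zip (PySem.List.pyRange 0 (xs.length : Int) 1)
      = ((PySem.List.pyRange 0 (xs.length : Int) 1).map (pvGroupAt xs 1)).zip
          (PySem.List.pyRange 0 (xs.length : Int) 1) := by rw [pv_groups_one]
  rw [hz]
  have hz2 : ((PySem.List.pyRange 0 (xs.length : Int) 1).map (pvGroupAt xs 1)).zip
      (PySem.List.pyRange 0 (xs.length : Int) 1)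
      = (PySem.List.pyRange 0 (xs.length : Int) 1).map (fun i => (pvGroupAt xs 1 i, i)) := by
    have h := List.zip_map' (f := pvGroupAt xs 1) (g := id)
      (l := PySem.List.pyRange 0 (xs.length : Int) 1)
    simpa using h
  rw [hz2, List.filter_map, List.map_map]
  simp [Function.comp_def]

-- A's dictionary in the prime ≥ 10 branch equals the index.
theorem pv_group_dict_eq (xs : List Char) (gl : Int) :
    (PySem.List.pyRange 0 (xs.length : Int) 1).foldl (fun d i =>
        let group := PySem.List.slice xs (some i) (some (i + gl))
        if (group.length : Int) = gl then
          if d.contains group then d.insert group (d.getD group [] ++ [i]) else d.insert group [i]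
        else
          let wrap := PySem.List.slice xs (some i) none ++
                      PySem.List.slice xs none (some (gl - group.length))
          if d.contains wrap then d.insert wrap (d.getD wrap [] ++ [i]) else d.insert wrap [i])
        PySem.Dict.empty
      = pvIndex xs gl := by
  unfold pvIndex
  rw [pv_zip_map_fold]
  exact pv_foldl_congr _ _ _ _ (fun d i => pv_stepA_eq_modify xs gl d i)

-- A's generate-loop group list is the map of the wrap-aware group function.
theorem pv_groupsA_fold_eq (xs : List Char) (gl : Int) :
    (PySem.List.pyRange 0 (xs.length : Int) 1).foldl (fun acc i =>
        let group := PySem.List.slice xs (some i) (some (i + gl))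
        if (group.length : Int) = gl then acc ++ [group]
        else acc ++ [PySem.List.slice xs (some i) none ++
                     PySem.List.slice xs none (some (gl - group.length))]) []
      = (PySem.List.pyRange 0 (xs.length : Int) 1).map (pvGroupAt xs gl) := by
  have hstep : ∀ (acc : List (List Char)) (i : Int),
      (let group := PySem.List.slice xs (some i) (some (i + gl))
       if (group.length : Int) = gl then acc ++ [group]
       else acc ++ [PySem.List.slice xs (some i) none ++
                    PySem.List.slice xs none (some (gl - group.length))])
        = acc ++ [pvGroupAt xs gl i] := by
    intro acc i
    simp only [pvGroupAt]
    by_cases h1 : ((PySem.List.slice xs (some i) (some (i + gl))).length : Int) = gl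
    · rw [if_pos h1, if_neg (by simpa using h1)]
    · rw [if_neg h1, if_pos (by simpa using h1)]
  rw [pv_foldl_congr _ _ _ _ hstep, PySem.List.foldl_append_singleton_eq_map]
  simp

-- B's membership-test range map equals A's group list.
theorem pv_grp_map_eq (xs : List Char) (gl : Int) (hgl : 0 ≤ gl) (hle : gl ≤ (xs.length : Int)) :
    (PySem.List.pyRange 0 (xs.length : Int) 1).map (pvGrp (xs ++ xs) gl)
      = (PySem.List.pyRange 0 (xs.length : Int) 1).map (pvGroupAt xs gl) := by
  apply List.map_congr_left
  intro i hi
  rw [PySem.List.mem_pyRange_one] at hi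
  exact pv_grp_eq xs gl i hgl hle hi.1 hi.2

-- A's pair loop over the index's position lists = B's guarded scan over index pairs.
theorem pv_inner_eq (xs : List Char) (gl : Int) (st t : List Char)
    (hgl : 0 ≤ gl) (hle : gl ≤ (xs.length : Int)) (hn : 0 < (xs.length : Int)) :
    pvMinimalMovement st t (pvIndex xs gl) (xs.length : Int) xs
      = (PySem.List.pyRange 0 (xs.length : Int) 1).foldl (fun best i =>
          if pvGrp (xs ++ xs) gl i ≠ st then best
          else (PySem.List.pyRange 0 (xs.length : Int) 1).foldl (fun best j =>
            if pvGrp (xs ++ xs) gl j ≠ t then best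
            else
              let d := PySem.Int.mod (j - i) (xs.length : Int)
              let mv := if 2 * d ≤ (xs.length : Int) then d else d - (xs.length : Int)
              if |mv| < |best| then mv else best) best) (xs.length : Int) := by
  simp only [pvMinimalMovement, pvIndex_getD, List.foldl_filter]
  apply PySem.List.foldl_congr_mem
  intro mm i hi
  rw [PySem.List.mem_pyRange_one] at hi
  rw [pv_grp_eq xs gl i hgl hle hi.1 hi.2]
  by_cases hst : pvGroupAt xs gl i = st
  · rw [if_pos (show (pvGroupAt xs gl i == st) = true by simpa using hst),
      if_neg (show ¬ pvGroupAt xs gl i ≠ st by simpa using hst)]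
    apply PySem.List.foldl_congr_mem
    intro mm2 j hj
    rw [PySem.List.mem_pyRange_one] at hj
    rw [pv_grp_eq xs gl j hgl hle hj.1 hj.2]
    by_cases ht : pvGroupAt xs gl j = t
    · rw [if_pos (show (pvGroupAt xs gl j == t) = true by simpa using ht),
        if_neg (show ¬ pvGroupAt xs gl j ≠ t by simpa using ht)]
      have hmv := pv_movement_eq ((xs.length : Nat) : Int) i j hn
      simp only [hmv]
    · rw [if_neg (show ¬ (pvGroupAt xs gl j == t) = true by simpa using ht),
        if_pos (show pvGroupAt xs gl j ≠ t by simpa using ht)]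
  · rw [if_neg (show ¬ (pvGroupAt xs gl i == st) = true by simpa using hst),
      if_pos (show pvGroupAt xs gl i ≠ st by simpa using hst)]

-- ===== VERDICT (by name: the statement is the Claim_ definition above) =====
set_option maxHeartbeats 1000000 in
theorem analyze_cyclic_prime_spec : Claim_equal_analyze_cyclic_prime := by
  intro prime cs _ hpre
  unfold Spec_analyze_cyclic_prime
  obtain ⟨hne, hlen⟩ := hpre
  have hn : 0 < ((cs.toList.length : Nat) : Int) := by
    cases hxs : cs.toList with
    | nil => exact absurd hxs hne
    | cons a l => simp
  by_cases h10 : prime < 10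
  · -- prime < 10: group length 1
    simp only [analyze_cyclic_prime, analyze_cyclic_prime_alt, pvGenerateTargetSequences,
      if_pos h10, if_neg (by omega : ¬ 10 ≤ prime)]
    rw [pv_char_dict_eq cs.toList]
    rw [pv_grp_map_eq cs.toList 1 (by omega) (by omega), pv_groups_one]
    cases hT : PySem.List.sorted (PySem.Set.ofList (cs.toList.map (fun c => [c]))) (fun k => k) false with
    | nil => rfl
    | cons t0 ts =>
      have ht0 : t0.length = 1 := by
        have hmem : t0 ∈ PySem.List.sorted (PySem.Set.ofList (cs.toList.map (fun c => [c])))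
            (fun k => k) false := by
          rw [hT]; exact List.mem_cons_self
        rw [PySem.List.mem_sorted, PySem.Set.mem_ofList] at hmem
        obtain ⟨c, _, hc⟩ := List.mem_map.mp hmem
        rw [← hc]
        rfl
      rw [show PySem.List.pyGetD (t0 :: ts) 0 [] = t0 from PySem.List.pyGetD_zero_cons t0 ts []]
      rw [ht0]
      rw [show pvGrp (cs.toList ++ cs.toList) 1 0 = PySem.List.slice cs.toList none (some 1) from
        pv_start_eq cs.toList 1 (by omega) (by omega)]
      rw [show ((1 : Nat) : Int) = (1 : Int) from rfl]
      exact pv_foldl_congr _ _ _ _ (fun out t => by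
        rw [pv_inner_eq cs.toList 1 (PySem.List.slice cs.toList none (some 1)) t
          (by omega) (by omega) hn])
  · -- prime ≥ 10: group length len(str(prime))
    have h10' : 10 ≤ prime := by omega
    have hgl0 : (0 : Int) ≤ ((PySem.Int.toStr prime).toList.length : Int) := by positivity
    have hglle : ((PySem.Int.toStr prime).toList.length : Int) ≤ (cs.toList.length : Int) := by
      exact_mod_cast hlen h10'
    simp only [analyze_cyclic_prime, analyze_cyclic_prime_alt, pvGenerateTargetSequences,
      if_neg h10, if_pos h10']
    rw [pv_group_dict_eq cs.toList ((PySem.Int.toStr prime).toList.length : Int)]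
    rw [pv_grp_map_eq cs.toList ((PySem.Int.toStr prime).toList.length : Int) hgl0 hglle]
    rw [pv_groupsA_fold_eq cs.toList ((PySem.Int.toStr prime).toList.length : Int)]
    cases hT : PySem.List.slice (PySem.List.sorted
        (PySem.Set.ofList ((PySem.List.pyRange 0 (cs.toList.length : Int) 1).map
          (pvGroupAt cs.toList ((PySem.Int.toStr prime).toList.length : Int))))
        (fun k => k) false) none (some (prime - 1)) with
    | nil => rfl
    | cons t0 ts =>
      have ht0 : ((t0.length : Nat) : Int) = ((PySem.Int.toStr prime).toList.length : Int) := by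
        have hmem : t0 ∈ PySem.List.slice (PySem.List.sorted
            (PySem.Set.ofList ((PySem.List.pyRange 0 (cs.toList.length : Int) 1).map
              (pvGroupAt cs.toList ((PySem.Int.toStr prime).toList.length : Int))))
            (fun k => k) false) none (some (prime - 1)) := by
          rw [hT]; exact List.mem_cons_self
        have hmem2 := PySem.List.mem_of_mem_slice _ _ _ hmem
        rw [PySem.List.mem_sorted, PySem.Set.mem_ofList] at hmem2
        obtain ⟨i, hi, hgi⟩ := List.mem_map.mp hmem2
        rw [PySem.List.mem_pyRange_one] at hi
        rw [← hgi]
        exact pv_group_length cs.toList _ hgl0 hglle i hi.1 hi.2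
      rw [show PySem.List.pyGetD (t0 :: ts) 0 [] = t0 from PySem.List.pyGetD_zero_cons t0 ts []]
      rw [ht0]
      rw [show pvGrp (cs.toList ++ cs.toList) ((PySem.Int.toStr prime).toList.length : Int) 0
          = PySem.List.slice cs.toList none (some ((PySem.Int.toStr prime).toList.length : Int)) from
        pv_start_eq cs.toList _ hgl0 hglle]
      exact pv_foldl_congr _ _ _ _ (fun out t => by
        rw [pv_inner_eq cs.toList ((PySem.Int.toStr prime).toList.length : Int)
          (PySem.List.slice cs.toList none (some ((PySem.Int.toStr prime).toList.length : Int))) t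
          hgl0 hglle hn])
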